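-- pv_equiv track=rewrite | github.com/unitn-sml/CAN | src/semantic_loss/still_life/still_life_constraints_full.py | n_k_combinations
-- ===== SOURCE A (Python) =====
-- import itertools
--
-- def n_k_combinations(n, k, indices):
--     """
--     Possible combination of n variables, with k of them being 1 and n-k 0.
--     :param n:
--     :return:
--     """
--
--     # indexes of k variables that are set to 1
--     k_indexes = list(itertools.permutations(range(n), k))
--     k_indexes = [tuple(sorted(el)) for el in k_indexes]
--     k_indexes = set(k_indexes)
--     possible_combinations = []
--
--     # for each K-tuple of indexes that should be set to 1, create an assignment
--     variables = "And(%s)"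
--     variables = variables % ",".join(["%sX.%s.%s" % ("%s", pair[0], pair[1]) for pair in indices])
--
--     for indexes in sorted(k_indexes):
--         # all values start as 0, 3 of them are set to 1
--         values = ["~" for _ in range(n)]
--         for index in indexes:
--             values[index] = ""
--         possible_combinations.append(variables % tuple(values))
--     possible_combinations = ",".join(possible_combinations)
--     return possible_combinations
-- ===== SOURCE B (Python) =====
-- def n_k_combinations(n, k, indices):
--     """
--     Possible combination of n variables, with k of them being 1 and n-k 0.
--     Recursive backtracking enumeration of the k-subsets in lexicographic
--     order, instead of generating (and deduplicating) all k-permutations.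
--     """
--     template = "And(%s)" % ",".join("%%sX.%s.%s" % (pair[0], pair[1]) for pair in indices)
--     out = []
--
--     def pick(start, rem, chosen):
--         if rem == 0:
--             values = ["~"] * n
--             for i in chosen:
--                 values[i] = ""
--             out.append(template % tuple(values))
--         else:
--             for i in range(start, n - rem + 1):
--                 pick(i + 1, rem - 1, chosen + [i])
--
--     pick(0, k, [])
--     return ",".join(out)
-- ===== Notes on version B (the rewrite author's own statement) =====
-- stated objective: faster
-- what changed: Replaces the generate-all-k-permutations / sort-each / dedupe-via-set / sort pipeline with a recursive backtracking enumerator that emits the k-subsets directly in lexicographic order, building the And(...) template once and joining as before.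
import Mathlib
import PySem

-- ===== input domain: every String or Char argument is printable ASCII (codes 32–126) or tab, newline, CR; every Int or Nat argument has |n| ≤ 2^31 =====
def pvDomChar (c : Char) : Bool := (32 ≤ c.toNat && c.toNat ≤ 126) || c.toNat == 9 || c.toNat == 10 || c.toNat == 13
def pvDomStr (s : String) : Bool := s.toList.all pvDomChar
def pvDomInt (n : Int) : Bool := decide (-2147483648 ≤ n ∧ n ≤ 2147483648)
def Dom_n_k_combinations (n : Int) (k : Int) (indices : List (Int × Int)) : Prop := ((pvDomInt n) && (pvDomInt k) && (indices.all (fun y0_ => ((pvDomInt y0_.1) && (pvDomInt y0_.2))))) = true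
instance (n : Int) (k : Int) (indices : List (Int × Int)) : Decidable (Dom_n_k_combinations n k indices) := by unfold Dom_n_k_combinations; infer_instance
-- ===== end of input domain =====

-- B replaces A's permutations/sort/set/sort pipeline by a recursive backtracking enumerator
-- of the k-subsets in lexicographic order (asymptotically less work; timing not measurable here).

-- shared helper: Python's '%'-formatting 'template % tuple(values)', exact when the template
-- holds exactly values.length '%s' placeholders besides '%%' escapes (Pre_ guarantees this
-- whenever either program applies it; on an arity mismatch Python raises, excluded by Pre_).
def pvFmtChars : List Char → List String → List Char
  | [], _ => []
  | '%' :: '%' :: rest, vs => '%' :: pvFmtChars rest vs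
  | '%' :: 's' :: rest, v :: vs => v.toList ++ pvFmtChars rest vs
  | c :: rest, vs => c :: pvFmtChars rest vs

def pvFmt (t : String) (vs : List String) : String := String.ofList (pvFmtChars t.toList vs)

-- ===== PORT A =====
def n_k_combinations (n : Int) (k : Int) (indices : List (Int × Int)) : String :=
  -- itertools.permutations(range(n), k); Python raises ValueError for k < 0 (excluded by Pre_)
  let kIndexes1 := PySem.List.permutations (PySem.List.pyRange 0 n) k.toNat
  -- [tuple(sorted(el)) for el in k_indexes]
  let kIndexes2 := kIndexes1.map (fun el => PySem.List.sorted el (fun x => x))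
  -- set(k_indexes)
  let kIndexes : PySem.Set (List Int) := PySem.Set.ofList kIndexes2
  -- variables = "And(%s)" ;  variables = variables % ",".join(["%sX.%s.%s" % ("%s", pair[0], pair[1]) for pair in indices])
  let pyVariables := "And(%s)"
  let pyVariables := pvFmt pyVariables
    [PySem.Str.join "," (indices.map (fun pair => pvFmt "%sX.%s.%s" ["%s", PySem.Int.toStr pair.1, PySem.Int.toStr pair.2]))]
  -- for indexes in sorted(k_indexes): values = ["~"]*…; values[index] = "" (indexes come from
  -- range(n), hence nonnegative, so values[index] is plain nonnegative indexing); append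
  let possibleCombinations := (PySem.List.sorted kIndexes (fun x => x)).foldl
    (fun acc indexes =>
      let values := (PySem.List.pyRange 0 n).map (fun _ => "~")
      let values := indexes.foldl (fun vs index => vs.set index.toNat "") values
      acc ++ [pvFmt pyVariables values]) ([] : List String)
  PySem.Str.join "," possibleCombinations

-- ===== PORT B =====
-- pick(start, rem, chosen) of Source B; rem = number of indices still to choose (0 ≤ rem always:
-- Python B is only reached with k ≥ 0 under Pre_); chosen holds indices from range(n), all
-- nonnegative, so values[i] = "" is plain nonnegative indexing.
def pvPick (template : String) (n : Int) : Nat → Int → Int → List Int → List String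
  | fuel, start, rem, chosen =>
    if rem == 0 then
      let values := List.replicate n.toNat "~"
      let values := chosen.foldl (fun vs i => vs.set i.toNat "") values
      [pvFmt template values]
    else
      match fuel with
      | 0 => []  -- fuel only runs out when rem < 0, where Python B's recursion never returns
                 -- (RecursionError) or, if the range below is empty, returns no emission either way
      | f + 1 =>
          (PySem.List.pyRange start (n - rem + 1)).flatMap
            (fun i => pvPick template n f (i + 1) (rem - 1) (chosen ++ [i]))

def n_k_combinations_alt (n : Int) (k : Int) (indices : List (Int × Int)) : String :=
  -- template = "And(%s)" % ",".join("%%sX.%s.%s" % (pair[0], pair[1]) for pair in indices)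
  let template := pvFmt "And(%s)"
    [PySem.Str.join "," (indices.map (fun pair => pvFmt "%%sX.%s.%s" [PySem.Int.toStr pair.1, PySem.Int.toStr pair.2]))]
  PySem.Str.join "," (pvPick template n k.toNat 0 k [])

-- ===== PRECONDITION & SPEC =====
-- Pre_ excludes exactly the inputs where Python A raises: k < 0 (ValueError from
-- itertools.permutations) and, when at least one assignment is emitted (0 ≤ k ≤ max(n,0)),
-- a placeholder/values arity mismatch len(indices) ≠ max(n,0) ('variables % tuple(values)'
-- raises TypeError).  Python B raises on exactly the same inputs.
def Pre_n_k_combinations (n : Int) (k : Int) (indices : List (Int × Int)) : Prop :=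
  0 ≤ k ∧ (k ≤ max n 0 → (indices.length : Int) = max n 0)
instance (n : Int) (k : Int) (indices : List (Int × Int)) : Decidable (Pre_n_k_combinations n k indices) := by unfold Pre_n_k_combinations; infer_instance

def pvWitness_n_k_combinations : Int × Int × (List (Int × Int)) := (3, 2, [(0, 0), (0, 1), (1, 0)])

def Spec_n_k_combinations (n : Int) (k : Int) (indices : List (Int × Int)) (out : String) : Prop := out = n_k_combinations_alt n k indices
instance (n : Int) (k : Int) (indices : List (Int × Int)) (out : String) : Decidable (Spec_n_k_combinations n k indices out) := by unfold Spec_n_k_combinations; infer_instance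

-- ===== CLAIM (what is proved, stated in full; the proofs are below) =====
def Claim_equal_n_k_combinations : Prop := ∀ (n : Int) (k : Int) (indices : List (Int × Int)), Dom_n_k_combinations n k indices → Pre_n_k_combinations n k indices → Spec_n_k_combinations n k indices (n_k_combinations n k indices)

-- ===== LEMMAS AND PROOFS =====

-- the common rendering of one assignment (proof-side abbreviation only)
def pvRender (template : String) (n : Int) (c : List Int) : String :=
  pvFmt template (c.foldl (fun vs i => vs.set i.toNat "") (List.replicate n.toNat "~"))


theorem pv_perms_zero {α : Type} (xs : List α) : PySem.List.permutations xs 0 = [[]] := by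
  rw [PySem.List.permutations]

theorem pv_perms_succ {α : Type} (xs : List α) (r : Nat) :
    PySem.List.permutations xs (r + 1) =
      (List.range xs.length).flatMap (fun i =>
        match xs[i]? with
        | none => []
        | some v => (PySem.List.permutations (xs.eraseIdx i) r).map (v :: ·)) := by
  rw [PySem.List.permutations]; rfl

theorem pv_perms_mono {α : Type} (r : Nat) (x : α) :
    ∀ (xs y : List α), y ∈ PySem.List.permutations xs r → y ∈ PySem.List.permutations (x :: xs) r := by
  induction r with
  | zero => intro xs y hy; simpa [pv_perms_zero] using hy
  | succ r ih =>
    intro xs y hy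
    rw [pv_perms_succ] at hy ⊢
    simp only [List.mem_flatMap, List.mem_range] at hy ⊢
    obtain ⟨i, hi, hmem⟩ := hy
    rw [List.getElem?_eq_getElem hi] at hmem
    simp only [List.mem_map] at hmem
    obtain ⟨p, hp, rfl⟩ := hmem
    refine ⟨i + 1, by simpa using Nat.succ_lt_succ hi, ?_⟩
    have h1 : (x :: xs)[i+1]? = some xs[i] := by
      simp [List.getElem?_cons_succ, List.getElem?_eq_getElem hi]
    rw [h1]
    have h2 : (x :: xs).eraseIdx (i+1) = x :: xs.eraseIdx i := rfl
    rw [h2]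
    exact List.mem_map.2 ⟨p, ih _ _ hp, rfl⟩

theorem pv_mem_perms_subperm {α : Type} (r : Nat) :
    ∀ (xs y : List α), y ∈ PySem.List.permutations xs r → y.Subperm xs ∧ y.length = r := by
  induction r with
  | zero => intro xs y hy; rw [pv_perms_zero] at hy; simp at hy; subst hy; simp [List.nil_subperm]
  | succ r ih =>
    intro xs y hy
    rw [pv_perms_succ] at hy
    simp only [List.mem_flatMap, List.mem_range] at hy
    obtain ⟨i, hi, hmem⟩ := hy
    rw [List.getElem?_eq_getElem hi] at hmem
    simp only [List.mem_map] at hmem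
    obtain ⟨p, hp, rfl⟩ := hmem
    obtain ⟨hsub, hlen⟩ := ih _ _ hp
    constructor
    · have h1 : (xs[i] :: p).Subperm (xs[i] :: xs.eraseIdx i) := (List.subperm_cons _).2 hsub
      have h2 : (xs[i] :: xs.eraseIdx i).Perm xs := (List.getElem_cons_eraseIdx_perm hi)
      exact h1.trans h2.subperm
    · simp [hlen]

theorem pv_mem_perms_of_sublist {α : Type} {c xs : List α} (h : c.Sublist xs) :
    c ∈ PySem.List.permutations xs c.length := by
  induction h with
  | slnil => rw [List.length_nil, pv_perms_zero]; simp
  | cons a h ih => exact pv_perms_mono _ _ _ _ ih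
  | @cons₂ l₁ l₂ a h ih =>
    rw [List.length_cons, pv_perms_succ]
    simp only [List.mem_flatMap, List.mem_range]
    refine ⟨0, by simp, ?_⟩
    simp only [List.getElem?_cons_zero, List.eraseIdx_cons_zero]
    exact List.mem_map.2 ⟨l₁, ih, rfl⟩

theorem pv_nodup_combinations {α : Type} [DecidableEq α] (xs : List α) (hx : xs.Nodup) :
    ∀ (r : Nat), (PySem.List.combinations xs r).Nodup := by
  induction xs with
  | nil =>
    intro r; cases r with
    | zero => rw [PySem.List.combinations_zero]; simp
    | succ r => rw [PySem.List.combinations_nil_succ]; simp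
  | cons x xs ih =>
    intro r
    cases r with
    | zero => rw [PySem.List.combinations_zero]; simp
    | succ r =>
      rw [PySem.List.combinations_cons_succ]
      have hxt : xs.Nodup := hx.of_cons
      have hxm : x ∉ xs := by simp [List.nodup_cons] at hx; exact hx.1
      apply List.Nodup.append
      · exact (ih hxt r).map (fun a b h => by simpa using h)
      · exact ih hxt (r + 1)
      · intro a ha hb
        simp only [List.mem_map] at ha
        obtain ⟨c, _, rfl⟩ := ha
        have := (PySem.List.mem_combinations_iff _ _ _).1 hb
        exact hxm (this.1.subset (by simp))

theorem pv_cons_lt_cons (x : Int) {a b : List Int} (h : a < b) : x :: a < x :: b := by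
  rw [List.cons_lt_cons_iff]; right; exact ⟨rfl, h⟩

theorem pv_lt_of_head_lt {x y : Int} (a b : List Int) (h : x < y) : x :: a < y :: b := by
  rw [List.cons_lt_cons_iff]; left; exact h

theorem pv_pairwise_lt_combinations (xs : List Int) (hx : xs.Pairwise (· < ·)) (r : Nat) :
    (PySem.List.combinations xs r).Pairwise (· < ·) := by
  induction xs generalizing r with
  | nil =>
    cases r with
    | zero => rw [PySem.List.combinations_zero]; simp
    | succ r => rw [PySem.List.combinations_nil_succ]; simp
  | cons x xs ih =>
    have hxt : xs.Pairwise (· < ·) := hx.of_cons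
    have hlt : ∀ y ∈ xs, x < y := by
      intro y hy; exact (List.pairwise_cons.1 hx).1 y hy
    cases r with
    | zero => rw [PySem.List.combinations_zero]; simp
    | succ r =>
      rw [PySem.List.combinations_cons_succ, List.pairwise_append]
      refine ⟨List.Pairwise.map _ (fun a b h => pv_cons_lt_cons x h) (ih hxt r), ih hxt (r + 1), ?_⟩
      intro a ha b hb
      simp only [List.mem_map] at ha
      obtain ⟨c, _, rfl⟩ := ha
      have hbm := (PySem.List.mem_combinations_iff _ _ _).1 hb
      cases b with
      | nil => simp at hbm
      | cons y d =>
        have hy : y ∈ xs := hbm.1.subset (by simp)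
        exact pv_lt_of_head_lt _ _ (hlt y hy)

theorem pv_sorted_set_eq (xs : List Int) (hx : xs.Pairwise (· < ·)) (r : Nat) :
    PySem.List.sorted (PySem.Set.ofList
        ((PySem.List.permutations xs r).map (fun el => PySem.List.sorted el (fun x => x))))
      (fun x => x) = PySem.List.combinations xs r := by
  have hxnd : xs.Nodup := hx.imp (fun h => ne_of_lt h)
  have key := @PySem.List.sorted_eq_of_perm_of_pairwise_lt (List ℤ) (List ℤ)
    List.instLinearOrder (PySem.Set.ofList
        ((PySem.List.permutations xs r).map (fun el => PySem.List.sorted el (fun x => x))))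
    (PySem.List.combinations xs r) (fun x => x) ?_ ?_
  · exact (congrArg (fun inst => @PySem.List.sorted (List ℤ) (List ℤ) List.instLT inst
      (PySem.Set.ofList ((PySem.List.permutations xs r).map (fun el => PySem.List.sorted el (fun x => x))))
      (fun x => x) false) (Subsingleton.elim _ _)).trans key
  · rw [List.perm_ext_iff_of_nodup (pv_nodup_combinations xs hxnd r) (PySem.Set.nodup_ofList _)]
    intro y
    rw [PySem.Set.mem_ofList, List.mem_map, PySem.List.mem_combinations_iff]
    constructor
    · rintro ⟨hsub, hlen⟩
      refine ⟨y, by rw [← hlen]; exact pv_mem_perms_of_sublist hsub, ?_⟩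
      exact PySem.List.sorted_eq_self_of_pairwise _ _ ((hx.sublist hsub).imp le_of_lt)
    · rintro ⟨p, hp, rfl⟩
      obtain ⟨hsub, hlen⟩ := pv_mem_perms_subperm r xs p hp
      have hperm : (PySem.List.sorted p (fun x => x)).Perm p := PySem.List.sorted_perm _ _ _
      have hsub' : (PySem.List.sorted p (fun x => x)).Subperm xs := hperm.subperm.trans hsub
      have hnd : (PySem.List.sorted p (fun x => x)).Nodup := by
        obtain ⟨l, hl1, hl2⟩ := hsub'
        exact hl1.nodup (hl2.nodup hxnd)
      have hle : (PySem.List.sorted p (fun x => x)).Pairwise (· ≤ ·) := by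
        have := PySem.List.sorted_pairwise p (fun x => x)
        simpa using this
      have hplt : (PySem.List.sorted p (fun x => x)).Pairwise (· < ·) :=
        (hle.and hnd).imp (fun ⟨h1, h2⟩ => lt_of_le_of_ne h1 h2)
      constructor
      · exact @List.sublist_of_subperm_of_pairwise _ _ ⟨fun _ _ h1 h2 => absurd h2 (not_lt.2 h1.le)⟩ _ _ hsub' hplt hx
      · rw [hperm.length_eq, hlen]
  · have := pv_pairwise_lt_combinations xs hx r
    simpa using this


theorem pv_pyRange_nil {a b : Int} (h : b ≤ a) : PySem.List.pyRange a b = [] := by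
  rw [PySem.List.pyRange_one]
  have : (b - a).toNat = 0 := by omega
  simp [this]

theorem pv_combinations_pyRange (r : Nat) (start n : Int) :
    PySem.List.combinations (PySem.List.pyRange start n) (r + 1) =
      (PySem.List.pyRange start (n - (r : Int))).flatMap
        (fun i => (PySem.List.combinations (PySem.List.pyRange (i + 1) n) r).map (i :: ·)) := by
  by_cases hs : start < n
  · rw [PySem.List.pyRange_one_cons hs, PySem.List.combinations_cons_succ]
    by_cases hs2 : start < n - (r : Int)
    · rw [PySem.List.pyRange_one_cons hs2, List.flatMap_cons,
        pv_combinations_pyRange r (start + 1) n]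
    · have hlen : (PySem.List.pyRange (start + 1) n).length < r := by
        rw [PySem.List.length_pyRange_one]; omega
      rw [PySem.List.combinations_eq_nil_of_length_lt _ hlen,
        PySem.List.combinations_eq_nil_of_length_lt _ (Nat.lt_succ_of_lt hlen),
        show PySem.List.pyRange start (n - (r : Int)) = [] from pv_pyRange_nil (by omega)]
      simp
  · rw [pv_pyRange_nil (le_of_not_gt hs), PySem.List.combinations_nil_succ,
      show PySem.List.pyRange start (n - (r : Int)) = [] from pv_pyRange_nil (by omega)]
    simp
termination_by (n - start).toNat
decreasing_by omega

theorem pv_pick_eq (template : String) (n : Int) (r : Nat) :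
    ∀ (start : Int) (chosen : List Int),
      pvPick template n r start (r : Int) chosen =
        (PySem.List.combinations (PySem.List.pyRange start n) r).map
          (fun c => pvRender template n (chosen ++ c)) := by
  induction r with
  | zero =>
    intro start chosen
    rw [PySem.List.combinations_zero]
    simp [pvPick, pvRender]
  | succ r ih =>
    intro start chosen
    have hst : n - (((r : Nat) + 1 : Nat) : Int) + 1 = n - (r : Int) := by push_cast; ring
    have hsub : ((((r : Nat) + 1 : Nat) : Int) - 1) = (r : Int) := by push_cast; ring
    rw [pvPick, if_neg (by simp; omega), hst, hsub, pv_combinations_pyRange, List.map_flatMap]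
    apply List.flatMap_congr  -- pointwise
    intro i _
    rw [ih (i + 1) (chosen ++ [i]), List.map_map]
    apply List.map_congr_left
    intro c _
    simp [Function.comp, List.append_assoc]

theorem pv_pick_eq_top (template : String) (n k : Int) (hk : 0 ≤ k) :
    pvPick template n k.toNat 0 k [] =
      (PySem.List.combinations (PySem.List.pyRange 0 n) k.toNat).map
        (fun c => pvRender template n c) := by
  have h2 : pvPick template n k.toNat 0 k [] = pvPick template n k.toNat 0 ((k.toNat : Nat) : Int) [] := by
    rw [Int.toNat_of_nonneg hk]
  rw [h2, pv_pick_eq]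
  simp

theorem pv_template_eq (a b : String) :
    pvFmt "%sX.%s.%s" ["%s", a, b] = pvFmt "%%sX.%s.%s" [a, b] := by
  simp [pvFmt, pvFmtChars]


-- ===== VERDICT (by name: the statement is the Claim_ definition above) =====
set_option maxHeartbeats 1000000 in
theorem n_k_combinations_spec : Claim_equal_n_k_combinations := by
  intro n k indices _ hpre0
  show n_k_combinations n k indices = n_k_combinations_alt n k indices
  rw [n_k_combinations, n_k_combinations_alt]
  rw [show (fun (pair : Int × Int) => pvFmt "%sX.%s.%s" ["%s", PySem.Int.toStr pair.1, PySem.Int.toStr pair.2])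
        = (fun (pair : Int × Int) => pvFmt "%%sX.%s.%s" [PySem.Int.toStr pair.1, PySem.Int.toStr pair.2]) from
      funext fun p => pv_template_eq _ _]
  rw [PySem.List.foldl_append_singleton_eq_map]
  rw [pv_sorted_set_eq _ (PySem.List.pairwise_lt_pyRange_one 0 n) k.toNat]
  rw [pv_pick_eq_top _ n k hpre0.1]
  have hrep : (PySem.List.pyRange 0 n).map (fun _ => "~") = List.replicate n.toNat "~" := by
    rw [List.map_const', PySem.List.length_pyRange_one]; norm_num
  simp only [hrep, List.nil_append, pvRender]
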